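-- pv_equiv track=rewrite | github.com/judsonB/MyVSCode | MyPython/02b_DizzySasquatch.py | dizzySquatch
-- ===== SOURCE A (Python) =====
-- def dizzySquatch(directions):
--   x = 0
--   y = 0
--   text = ""
--   for dir in directions:
--     if dir == "North":
--       y += 1
--     elif dir == "East":
--       x += 1
--     elif dir == "South":
--       y -= 1
--     else:
--       x -= 1
--     text += f"({x}, {y}) - "
--     if x <= 4 and x >= -4 and y <= 4 and y >= -4:
--       text += "safe"
--     elif x <= 7 and x >= -7 and y <= 7 and y >= -7:
--       text += "close..."
--     elif x <= 8 and x >= -8 and y <= 8 and y >= -8: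
--       text += "Tipping!!!!!"
--     else:
--       text += "Splash!\n"
--       text += "Sasquatch Fell!"
--       return(text)
--     text += "\n"
--   text += "Sasquatch stayed on the platform!"
--   return text
-- ===== SOURCE B (Python) =====
-- DELTAS = {"North": (0, 1), "East": (1, 0), "South": (0, -1)}
--
-- def dizzySquatch(directions):
--     # pass 1: cumulative positions
--     x = y = 0
--     positions = []
--     for d in directions:
--         dx, dy = DELTAS.get(d, (-1, 0))
--         x += dx
--         y += dy
--         positions.append((x, y))
--     # pass 2: classify each position, join lines at the end
--     lines = []
--     for px, py in positions:
--         m = max(abs(px), abs(py))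
--         if m <= 4:
--             label = "safe"
--         elif m <= 7:
--             label = "close..."
--         elif m <= 8:
--             label = "Tipping!!!!!"
--         else:
--             lines.append(f"({px}, {py}) - Splash!\nSasquatch Fell!")
--             return "\n".join(lines)
--         lines.append(f"({px}, {py}) - {label}")
--     lines.append("Sasquatch stayed on the platform!")
--     return "\n".join(lines)
-- ===== Notes on version B (the rewrite author's own statement) =====
-- stated objective: alternative
-- what changed: A's single fused loop (mutating x,y and concatenating onto one growing string with trailing newlines) is replaced by two separate passes: a delta-dictionary-driven cumulative-position table, then a classification pass that collects per-step lines and joins them with '\n' at the end.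
import Mathlib
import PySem

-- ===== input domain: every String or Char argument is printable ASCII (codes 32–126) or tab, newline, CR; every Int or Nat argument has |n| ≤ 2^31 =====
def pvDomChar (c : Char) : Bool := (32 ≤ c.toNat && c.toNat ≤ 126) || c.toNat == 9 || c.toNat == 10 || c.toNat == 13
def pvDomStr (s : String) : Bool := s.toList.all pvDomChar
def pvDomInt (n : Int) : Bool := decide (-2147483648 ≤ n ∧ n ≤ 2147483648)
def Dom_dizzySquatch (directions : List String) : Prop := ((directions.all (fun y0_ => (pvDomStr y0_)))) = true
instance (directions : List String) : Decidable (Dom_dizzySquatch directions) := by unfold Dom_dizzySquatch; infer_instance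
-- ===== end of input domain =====

-- B replaces A's single fused loop by two passes — a cumulative-position table driven by a
-- delta dictionary, then a classification pass that collects lines and joins them — same output.

-- ===== PORT A =====
-- faithful transliteration of A's loop; the growing string is carried as List Char, wrapped at the end
def dizzyLoopA : Int → Int → List Char → List String → List Char
  | _, _, text, [] => text ++ "Sasquatch stayed on the platform!".toList
  | x, y, text, dir :: rest =>
    let xy : Int × Int :=
      if dir = "North" then (x, y + 1)
      else if dir = "East" then (x + 1, y)
      else if dir = "South" then (x, y - 1)
      else (x - 1, y)
    let x := xy.1
    let y := xy.2
    let text := text ++ "(".toList ++ PySem.Int.toChars x ++ ", ".toList ++ PySem.Int.toChars y ++ ") - ".toList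
    if x ≤ 4 ∧ -4 ≤ x ∧ y ≤ 4 ∧ -4 ≤ y then
      dizzyLoopA x y (text ++ "safe".toList ++ "\n".toList) rest
    else if x ≤ 7 ∧ -7 ≤ x ∧ y ≤ 7 ∧ -7 ≤ y then
      dizzyLoopA x y (text ++ "close...".toList ++ "\n".toList) rest
    else if x ≤ 8 ∧ -8 ≤ x ∧ y ≤ 8 ∧ -8 ≤ y then
      dizzyLoopA x y (text ++ "Tipping!!!!!".toList ++ "\n".toList) rest
    else
      text ++ "Splash!\n".toList ++ "Sasquatch Fell!".toList

def dizzySquatch (directions : List String) : String :=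
  String.ofList (dizzyLoopA 0 0 [] directions)

-- ===== PORT B =====
def pvDeltas : PySem.Dict String (Int × Int) :=
  PySem.Dict.ofList [("North", (0, 1)), ("East", (1, 0)), ("South", (0, -1))]

-- pass 1 of Source B: cumulative positions
def pvPositions : Int → Int → List String → List (Int × Int)
  | _, _, [] => []
  | x, y, d :: rest =>
    let dxy := PySem.Dict.getD pvDeltas d (-1, 0)
    let x := x + dxy.1
    let y := y + dxy.2
    (x, y) :: pvPositions x y rest

-- f"({px}, {py}) - {label}"
def pvRecord (px py : Int) (label : List Char) : List Char :=
  "(".toList ++ PySem.Int.toChars px ++ ", ".toList ++ PySem.Int.toChars py ++ ") - ".toList ++ label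

-- pass 2 of Source B: classify, collect lines, join with "\n"
def pvClassify : List (List Char) → List (Int × Int) → List Char
  | lines, [] => PySem.Chars.join "\n".toList (lines ++ ["Sasquatch stayed on the platform!".toList])
  | lines, (px, py) :: rest =>
    let m := max |px| |py|
    if m ≤ 4 then pvClassify (lines ++ [pvRecord px py "safe".toList]) rest
    else if m ≤ 7 then pvClassify (lines ++ [pvRecord px py "close...".toList]) rest
    else if m ≤ 8 then pvClassify (lines ++ [pvRecord px py "Tipping!!!!!".toList]) rest
    else PySem.Chars.join "\n".toList (lines ++ [pvRecord px py "Splash!\nSasquatch Fell!".toList])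

def dizzySquatch_alt (directions : List String) : String :=
  String.ofList (pvClassify [] (pvPositions 0 0 directions))

-- ===== PRECONDITION & SPEC =====
def Spec_dizzySquatch (directions : List String) (out : String) : Prop := out = dizzySquatch_alt directions
instance (directions : List String) (out : String) : Decidable (Spec_dizzySquatch directions out) := by unfold Spec_dizzySquatch; infer_instance

-- ===== CLAIM (what is proved, stated in full; the proofs are below) =====
def Claim_equal_dizzySquatch : Prop := ∀ (directions : List String), Dom_dizzySquatch directions → Spec_dizzySquatch directions (dizzySquatch directions)

-- ===== LEMMAS AND PROOFS =====

-- A's text parameter is a pure accumulator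
theorem dizzyLoopA_accum (dirs : List String) : ∀ (x y : Int) (t : List Char),
    dizzyLoopA x y t dirs = t ++ dizzyLoopA x y [] dirs := by
  induction dirs with
  | nil => intro x y t; simp [dizzyLoopA]
  | cons d rest ih =>
    intro x y t
    simp only [dizzyLoopA]
    split_ifs <;>
      all_goals
        (try (conv_lhs => rw [ih])) <;> (try (conv_rhs => rw [ih])) <;> simp

-- the dictionary lookup of B equals A's branch chain
theorem deltas_getD (d : String) :
    PySem.Dict.getD pvDeltas d (-1, 0) =
      if d = "North" then ((0 : Int), (1 : Int))
      else if d = "East" then (1, 0)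
      else if d = "South" then (0, -1)
      else (-1, 0) := by
  by_cases h1 : d = "North"
  · subst h1; decide
  · by_cases h2 : d = "East"
    · subst h2; decide
    · by_cases h3 : d = "South"
      · subst h3; decide
      · have b1 : ("North" == d) = false := by simp [Ne.symm h1]
        have b2 : ("East" == d) = false := by simp [Ne.symm h2]
        have b3 : ("South" == d) = false := by simp [Ne.symm h3]
        simp [h1, h2, h3, pvDeltas, PySem.Dict.ofList, PySem.Dict.getD_eq_get?_getD,
          PySem.Dict.update, PySem.Dict.insert, PySem.Dict.empty, PySem.Dict.get?,
          List.find?, b1, b2, b3]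

theorem join_nl_flat (fin : List Char) : ∀ (lines : List (List Char)),
    PySem.Chars.join ['\n'] (lines ++ [fin]) =
      (lines.map (· ++ ['\n'])).flatten ++ fin := by
  intro lines
  induction lines with
  | nil => simp [PySem.Chars.join_singleton]
  | cons l ls ih =>
    cases ls with
    | nil => simp [PySem.Chars.join_cons_cons, PySem.Chars.join_singleton]
    | cons l2 ls2 =>
      simp only [List.cons_append, PySem.Chars.join_cons_cons] at *
      simp [ih]

theorem nl_toList : "\n".toList = ['\n'] := rfl

theorem band_iff (a b c : Int) :
    (max |a| |b| ≤ c) ↔ (a ≤ c ∧ -c ≤ a ∧ b ≤ c ∧ -c ≤ b) := by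
  rw [max_le_iff, abs_le, abs_le]; tauto

theorem classify_cons (rest : List String) (x' y' : Int)
    (ih : ∀ lines, pvClassify lines (pvPositions x' y' rest)
      = (lines.map (· ++ ['\n'])).flatten ++ dizzyLoopA x' y' [] rest) :
    ∀ lines, pvClassify lines ((x', y') :: pvPositions x' y' rest)
      = (lines.map (· ++ ['\n'])).flatten ++
        ("(".toList ++ PySem.Int.toChars x' ++ ", ".toList ++ PySem.Int.toChars y' ++ ") - ".toList ++
          (if x' ≤ 4 ∧ -4 ≤ x' ∧ y' ≤ 4 ∧ -4 ≤ y' then "safe".toList ++ ['\n'] ++ dizzyLoopA x' y' [] rest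
           else if x' ≤ 7 ∧ -7 ≤ x' ∧ y' ≤ 7 ∧ -7 ≤ y' then "close...".toList ++ ['\n'] ++ dizzyLoopA x' y' [] rest
           else if x' ≤ 8 ∧ -8 ≤ x' ∧ y' ≤ 8 ∧ -8 ≤ y' then "Tipping!!!!!".toList ++ ['\n'] ++ dizzyLoopA x' y' [] rest
           else "Splash!\n".toList ++ "Sasquatch Fell!".toList)) := by
  intro lines
  simp only [pvClassify, band_iff]
  split_ifs
  · rw [ih]; simp [pvRecord]
  · rw [ih]; simp [pvRecord]
  · rw [ih]; simp [pvRecord]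
  · simp only [nl_toList]; rw [join_nl_flat]; simp [pvRecord]

theorem main_lemma (dirs : List String) : ∀ (x y : Int) (lines : List (List Char)),
    pvClassify lines (pvPositions x y dirs) =
      (lines.map (· ++ ['\n'])).flatten ++ dizzyLoopA x y [] dirs := by
  induction dirs with
  | nil =>
    intro x y lines
    show PySem.Chars.join ['\n'] (lines ++ _) = _
    rw [join_nl_flat]
    simp [dizzyLoopA]
  | cons d rest ih =>
    intro x y lines
    simp only [pvPositions, deltas_getD]
    by_cases hN : d = "North"
    · simp only [hN, if_true, reduceIte, add_zero]
      rw [classify_cons rest x (y + 1) (ih x (y + 1))]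
      simp only [dizzyLoopA, hN, reduceIte]
      simp only [List.nil_append]
      split_ifs <;> (try (conv_rhs => rw [dizzyLoopA_accum])) <;> simp
    · by_cases hE : d = "East"
      · simp only [hN, hE, String.reduceEq, if_true, if_false, reduceIte, add_zero]
        rw [classify_cons rest (x + 1) y (ih (x + 1) y)]
        simp only [dizzyLoopA, String.reduceEq, reduceIte]
        simp only [List.nil_append]
        split_ifs <;> (try (conv_rhs => rw [dizzyLoopA_accum])) <;> simp
      · by_cases hS : d = "South"
        · simp only [hN, hE, hS, String.reduceEq, if_true, if_false, reduceIte, add_zero, ← sub_eq_add_neg]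
          rw [classify_cons rest x (y - 1) (ih x (y - 1))]
          simp only [dizzyLoopA, String.reduceEq, reduceIte]
          simp only [List.nil_append]
          split_ifs <;> (try (conv_rhs => rw [dizzyLoopA_accum])) <;> simp
        · simp only [hN, hE, hS, if_false, reduceIte, add_zero, ← sub_eq_add_neg]
          rw [classify_cons rest (x - 1) y (ih (x - 1) y)]
          simp only [dizzyLoopA, hN, hE, hS, reduceIte]
          simp only [List.nil_append]
          split_ifs <;> (try (conv_rhs => rw [dizzyLoopA_accum])) <;> simp

-- ===== VERDICT (by name: the statement is the Claim_ definition above) =====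
theorem dizzySquatch_spec : Claim_equal_dizzySquatch := by
  intro directions _
  unfold Spec_dizzySquatch dizzySquatch dizzySquatch_alt
  rw [main_lemma]
  simp
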